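-- pv_equiv track=rewrite | github.com/LautaroDiana/MeLiApp | mutant.py | get_diagonal_one_sided
-- ===== SOURCE A (Python) =====
-- def diagonalize(array):
--     new_array = []
--
--     for row in array:
--         new_array.append([element for element in row])
--
--     n=len(new_array)
--     aux = [[] for empty_lists in range(2*n-1)]
--     k = 0
--
--     for i in range(n):
--         for j in range(n):
--             k = i + j
--             aux[k].append(new_array[i][j])
--
--     output = []
--     for row in aux:
--         output.append(''.join(row))
--
--     return output
--
-- def get_diagonal_one_sided(array):
--     letters = ['A']#['A','T','C','G']
--     output = False
--     aux = diagonalize(array)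
--     indexes = []
--
--     for letter in letters:
--         mask = []
--         result = []
--
--         for row in aux:
--             mask.append([1 if element == letter else 0 for element in row])
--
--         for row in mask:
--             row_str = ''.join([str(element) for element in row])
--             result.append(row_str.split('0'))
--
--         for row in result:
--             for element in row:
--                 if len(element) >= 4:
--                     indexes.append(len(element))
--     if indexes != []:
--         output = True
--     return output
-- ===== SOURCE B (Python) =====
-- def get_diagonal_one_sided(array):
--     n = len(array)
--     found = False
--     for k in range(2 * n - 1):
--         run = 0
--         for i in range(max(0, k - n + 1), min(n, k + 1)):
--             for ch in array[i][k - i]: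
--                 if ch == 'A':
--                     run += 1
--                     if run == 4:
--                         found = True
--                 else:
--                     run = 0
--     return found
-- ===== Notes on version B (the rewrite author's own statement) =====
-- stated objective: simpler
-- what changed: Replaces the copy/diagonalize/mask/str-join/split('0') pipeline with a direct walk of each anti-diagonal keeping a run-length counter of consecutive 'A' characters.
import Mathlib
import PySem

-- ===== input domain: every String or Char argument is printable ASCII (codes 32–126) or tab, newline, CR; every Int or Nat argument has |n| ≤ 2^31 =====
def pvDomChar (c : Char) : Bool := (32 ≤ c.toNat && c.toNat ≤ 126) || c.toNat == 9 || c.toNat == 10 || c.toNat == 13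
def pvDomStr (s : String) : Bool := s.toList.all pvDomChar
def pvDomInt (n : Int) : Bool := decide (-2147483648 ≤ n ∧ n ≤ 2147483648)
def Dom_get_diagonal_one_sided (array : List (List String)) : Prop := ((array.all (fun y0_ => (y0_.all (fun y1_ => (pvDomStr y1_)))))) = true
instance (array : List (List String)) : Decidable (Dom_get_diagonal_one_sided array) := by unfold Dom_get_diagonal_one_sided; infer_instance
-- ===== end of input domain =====

-- B replaces A's copy/diagonalize/mask/join/split('0') pipeline by a direct anti-diagonal walk
-- with a run-length counter of consecutive 'A' characters (same return value; objective: simpler).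
set_option maxHeartbeats 1600000

-- ===== PORT A =====
-- Literal transliteration of A. Python's new_array[i][j] (an IndexError on ragged input) is
-- ported with getD; exactly those raising inputs are excluded by Pre_ below. The mask step
-- compares each character of the joined diagonal string with the 1-char string 'A', ported as a
-- Char comparison; ''.join/str(int)/split('0') are ported with PySem.Chars (exact on the domain).
def diagonalize (array : List (List String)) : List String :=
  let new_array := array.foldl (fun acc row => acc ++ [row.foldl (fun r element => r ++ [element]) []]) []
  let n := new_array.length
  let aux : List (List String) := (List.range (2*n-1)).map (fun _ => ([] : List String))
  let aux := (List.range n).foldl (fun aux i =>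
      (List.range n).foldl (fun aux j =>
        let k := i + j
        aux.modify k (fun r => r ++ [(new_array.getD i []).getD j ""])) aux) aux
  aux.foldl (fun output row => output ++ [PySem.Str.join "" row]) []

def get_diagonal_one_sided (array : List (List String)) : Bool :=
  let letters := ['A']   -- the 1-char strings 'A' compared charwise (exact: mask iterates the chars of each diagonal string)
  let output := false
  let aux := diagonalize array
  let indexes : List Nat := []
  let indexes := letters.foldl (fun indexes letter =>
    let mask := aux.foldl (fun mask row =>
      mask ++ [row.toList.map (fun element => if element = letter then (1:Int) else 0)]) ([] : List (List Int))
    let result := mask.foldl (fun result row =>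
      let row_str := PySem.Chars.join [] (row.map (fun element => PySem.Int.toChars element))
      result ++ [PySem.Chars.splitOn row_str ['0']]) ([] : List (List (List Char)))
    result.foldl (fun indexes row =>
      row.foldl (fun indexes element =>
        if 4 ≤ element.length then indexes ++ [element.length] else indexes) indexes) indexes) indexes
  let output := if indexes ≠ [] then true else output
  output

-- ===== PORT B =====
-- Literal transliteration of B (Source B): for each anti-diagonal k, walk i upward, scanning the
-- characters of array[i][k-i] with a running count of consecutive 'A's; range(max(0,k-n+1),min(n,k+1))
-- is List.range' with Nat truncated subtraction (equal to Python's max/min bounds).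
def get_diagonal_one_sided_alt (array : List (List String)) : Bool :=
  let n := array.length
  (List.range (2*n-1)).foldl (fun found k =>
    ((List.range' (k+1-n) (min n (k+1) - (k+1-n))).foldl (fun (st : Bool × Nat) i =>
      ((array.getD i []).getD (k-i) "").toList.foldl (fun (st : Bool × Nat) ch =>
        if ch = 'A' then (if st.2 + 1 = 4 then true else st.1, st.2 + 1)
        else (st.1, 0)) st) (found, 0)).1) false


-- ===== PRECONDITION & SPEC =====
-- Pre_ excludes exactly the ragged inputs (some row shorter than the number of rows), on which
-- Python A raises IndexError in diagonalize.
def Pre_get_diagonal_one_sided (array : List (List String)) : Prop :=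
  ∀ row ∈ array, array.length ≤ row.length
instance (array : List (List String)) : Decidable (Pre_get_diagonal_one_sided array) := by
  unfold Pre_get_diagonal_one_sided; infer_instance

def pvWitness_get_diagonal_one_sided : List (List String) := [["A", "B"], ["AAAA", "C"]]

def Spec_get_diagonal_one_sided (array : List (List String)) (out : Bool) : Prop := out = get_diagonal_one_sided_alt array
instance (array : List (List String)) (out : Bool) : Decidable (Spec_get_diagonal_one_sided array out) := by unfold Spec_get_diagonal_one_sided; infer_instance

-- ===== CLAIM (what is proved, stated in full; the proofs are below) =====
def Claim_equal_get_diagonal_one_sided : Prop := ∀ (array : List (List String)), Dom_get_diagonal_one_sided array → Pre_get_diagonal_one_sided array → Spec_get_diagonal_one_sided array (get_diagonal_one_sided array)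

-- ===== LEMMAS AND PROOFS =====
-- proof-side helper definitions
def pvCell (array : List (List String)) (i j : Nat) : String := (array.getD i []).getD j ""

def pvDiagCells (array : List (List String)) (k : Nat) : List String :=
  (List.range array.length).flatMap
    (fun i => if i ≤ k ∧ k - i < array.length then [pvCell array i (k-i)] else [])

def pvDiagChars (array : List (List String)) (k : Nat) : List Char :=
  ((pvDiagCells array k).map String.toList).flatten

def pvStep (st : Bool × Nat) (ch : Char) : Bool × Nat :=
  if ch = 'A' then (if st.2 + 1 = 4 then true else st.1, st.2 + 1) else (st.1, 0)

def pvMask01 (cs : List Char) : List Char := cs.map (fun c => if c = 'A' then '1' else '0')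

def pvDetA (cs : List Char) : Bool :=
  (PySem.Chars.splitOn (pvMask01 cs) ['0']).any (fun e => decide (4 ≤ e.length))

def mySplit : List Char → List Char → List (List Char)
  | pre, [] => [pre]
  | pre, c :: rest => if c = '0' then pre :: mySplit [] rest else mySplit (pre ++ [c]) rest

theorem go_eq (fuel : Nat) (l cur : List Char) (acc : List (List Char)) (h : l.length < fuel) :
    PySem.Chars.splitOn.go ['0'] fuel l cur acc = acc.reverse ++ mySplit cur.reverse l := by
  induction fuel generalizing l cur acc with
  | zero => omega
  | succ f ih =>
    cases l with
    | nil =>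
      rw [PySem.Chars.splitOn.go]
      simp [mySplit]
      omega
    | cons c rest =>
      rw [PySem.Chars.splitOn.go]
      by_cases hc : c = '0'
      · subst hc
        simp only [List.isPrefixOf]
        simp [ih _ _ _ (by simpa using Nat.lt_of_succ_lt_succ h), mySplit]
      · simp only [List.isPrefixOf]
        have hbeq : ('0' == c) = false := by simp [Ne.symm hc]
        simp [hbeq, ih rest (c :: cur) acc (by simpa using Nat.lt_of_succ_lt_succ h), mySplit, hc]

theorem splitOn_eq (l : List Char) : PySem.Chars.splitOn l ['0'] = mySplit [] l := by
  rw [PySem.Chars.splitOn]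
  simpa using go_eq (l.length + 1) l [] [] (by omega)

theorem head_mySplit (l pre : List Char) : ∃ t rest, mySplit pre l = (pre ++ t) :: rest := by
  induction l generalizing pre with
  | nil => exact ⟨[], [], by simp [mySplit]⟩
  | cons c rest ih =>
    by_cases hc : c = '0'
    · exact ⟨[], mySplit [] rest, by simp [mySplit, hc]⟩
    · obtain ⟨t, r, h⟩ := ih (pre ++ [c])
      exact ⟨[c] ++ t, r, by simp [mySplit, hc, h]⟩

-- main run-characterisation lemma
theorem run_main (cs : List Char) : ∀ (pre : List Char) (found : Bool) (run : Nat),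
    pre.length = run → (4 ≤ run → found = true) →
    (found || (mySplit pre (pvMask01 cs)).any (fun e => decide (4 ≤ e.length)))
      = (cs.foldl pvStep (found, run)).1 := by
  induction cs with
  | nil =>
    intro pre found run hlen hf
    simp [pvMask01, mySplit]
    rcases Nat.lt_or_ge run 4 with h4 | h4
    · simp [hlen, Nat.not_le_of_lt h4]
    · simp [hf h4]
  | cons c cs ih =>
    intro pre found run hlen hf
    by_cases hc : c = 'A'
    · subst hc
      have hmask : pvMask01 ('A' :: cs) = '1' :: pvMask01 cs := by simp [pvMask01]
      rw [hmask]
      have hstep : ('A' :: cs).foldl pvStep (found, run)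
          = cs.foldl pvStep (if run + 1 = 4 then true else found, run + 1) := by
        simp [pvStep]
      rw [hstep]
      rw [show mySplit pre ('1' :: pvMask01 cs) = mySplit (pre ++ ['1']) (pvMask01 cs) by
        simp [mySplit]]
      have ih' := ih (pre ++ ['1']) (if run + 1 = 4 then true else found) (run + 1)
        (by simp [hlen]) (by
          intro h4
          by_cases he : run + 1 = 4
          · simp [he]
          · have : 4 ≤ run := by omega
            simp [he, hf this])
      rw [← ih']
      by_cases he : run + 1 = 4
      · simp only [he, if_pos rfl]
        obtain ⟨t, r, hsp⟩ := head_mySplit (pvMask01 cs) (pre ++ ['1'])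
        simp [hsp]
        right; left; omega
      · simp [he]
    · have hmask : pvMask01 (c :: cs) = '0' :: pvMask01 cs := by simp [pvMask01, hc]
      rw [hmask]
      have hstep : (c :: cs).foldl pvStep (found, run) = cs.foldl pvStep (found, 0) := by
        simp [pvStep, hc]
      rw [hstep]
      rw [show mySplit pre ('0' :: pvMask01 cs) = pre :: mySplit [] (pvMask01 cs) by simp [mySplit]]
      have ih' := ih [] found 0 rfl (by omega)
      rw [← ih']
      rcases Nat.lt_or_ge run 4 with h4 | h4
      · simp [hlen, Nat.not_le_of_lt h4]
      · simp [hf h4]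

theorem detA_eq_run (cs : List Char) :
    pvDetA cs = (cs.foldl pvStep (false, 0)).1 := by
  rw [pvDetA, splitOn_eq]
  simpa using run_main cs [] false 0 rfl (by omega)

-- generic list lemmas
theorem foldl_flatMap' {α β γ : Type} (l : List α) (g : α → List β) (f : γ → β → γ) (init : γ) :
    (l.flatMap g).foldl f init = l.foldl (fun a x => (g x).foldl f a) init := by
  rw [List.flatMap_def, List.foldl_flatten, List.foldl_map]

theorem foldl_modify_get? (us : List (Nat × String)) : ∀ (aux : List (List String)) (k : Nat),
    (us.foldl (fun a p => a.modify p.1 (fun r => r ++ [p.2])) aux)[k]? =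
      (aux[k]?).map (fun r => r ++ (us.filter (fun p => p.1 == k)).map Prod.snd) := by
  induction us with
  | nil => intro aux k; cases h : aux[k]? <;> simp [h]
  | cons u us ih =>
    intro aux k
    simp only [List.foldl_cons, ih, List.getElem?_modify, List.filter_cons]
    by_cases hk : u.1 = k
    · have hb : (u.1 == k) = true := by simp [hk]
      cases h : aux[k]? <;> simp [h, hk, hb]
    · have hb : (u.1 == k) = false := by simp [hk]
      cases h : aux[k]? <;> simp [h, hk, hb]

theorem flatMap_if_singleton {α β : Type} (l : List α) (P : α → Prop) [DecidablePred P] (f : α → β) :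
    (l.flatMap (fun x => if P x then [f x] else [])) = (l.filter (fun x => decide (P x))).map f := by
  induction l with
  | nil => rfl
  | cons a l ih =>
    by_cases h : P a <;> simp [List.filter_cons, h, ih]

theorem range_filter_key (i k : Nat) : ∀ n,
    (List.range n).filter (fun j => i + j == k) = if i ≤ k ∧ k - i < n then [k - i] else [] := by
  intro n
  induction n with
  | zero => simp
  | succ m ih =>
    rw [List.range_succ, List.filter_append, ih]
    by_cases h1 : i ≤ k ∧ k - i < m
    · have : (i + m == k) = false := by simp; omega
      have h2 : i ≤ k ∧ k - i < m + 1 := ⟨h1.1, by omega⟩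
      simp [this, h1, h2]
    · by_cases h3 : i + m = k
      · have h2 : i ≤ k ∧ k - i < m + 1 := by omega
        have h4 : k - i = m := by omega
        simp [h1, h2, h3, h4]
      · have h2 : ¬ (i ≤ k ∧ k - i < m + 1) := by omega
        have : (i + m == k) = false := by simp [h3]
        simp [h1, h2, this]
        omega

theorem filter_range_Ico (lo hi : Nat) : ∀ n,
    (List.range n).filter (fun i => decide (lo ≤ i ∧ i < hi)) = List.range' lo (min hi n - lo) := by
  intro n
  induction n with
  | zero => simp
  | succ m ih =>
    rw [List.range_succ, List.filter_append, ih]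
    by_cases h1 : m < hi
    · by_cases h2 : lo ≤ m
      · have hmin : min hi (m+1) - lo = (min hi m - lo) + 1 := by omega
        have hm : min hi m - lo = m - lo := by omega
        rw [hmin, List.range'_1_concat]
        have : lo + (min hi m - lo) = m := by omega
        simp [h2, h1, this]
      · have : min hi (m+1) - lo = 0 ∧ min hi m - lo = 0 := by omega
        simp [this.1, this.2, h2]
    · have : min hi (m+1) = min hi m := by omega
      simp [this, h1]

theorem join_nil_flatten (l : List (List Char)) : PySem.Chars.join [] l = l.flatten := by
  simp [PySem.Chars.join, List.intercalate]
  induction l with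
  | nil => simp
  | cons a t ih =>
    cases t with
    | nil => simp [List.intersperse]
    | cons b t2 => simp_all [List.intersperse]

theorem mask_chars (cs : List Char) :
    PySem.Chars.join [] ((cs.map (fun element => if element = 'A' then (1:Int) else 0)).map
      (fun element => PySem.Int.toChars element)) = pvMask01 cs := by
  rw [join_nil_flatten]
  induction cs with
  | nil => rfl
  | cons c t ih =>
    by_cases h : c = 'A' <;>
      simp [h, pvMask01, ih, show PySem.Int.toChars (1:Int) = ['1'] from by decide,
        show PySem.Int.toChars (0:Int) = ['0'] from by decide] <;>
      simpa [pvMask01] using ih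

theorem pairs_filter (array : List (List String)) (k : Nat) :
    (((List.range array.length).flatMap
        (fun i => (List.range array.length).map (fun j => (i+j, pvCell array i j)))).filter
      (fun p => p.1 == k)).map Prod.snd = pvDiagCells array k := by
  rw [List.filter_flatMap, List.map_flatMap]
  unfold pvDiagCells
  have hpt : ∀ i, (((List.range array.length).map (fun j => (i+j, pvCell array i j))).filter
      (fun p => p.1 == k)).map Prod.snd
      = if i ≤ k ∧ k - i < array.length then [pvCell array i (k-i)] else [] := by
    intro i
    rw [List.filter_map]
    have hcomp : ((fun p : Nat × String => p.1 == k) ∘ (fun j => (i+j, pvCell array i j)))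
        = fun j => i + j == k := rfl
    rw [hcomp, range_filter_key]
    by_cases h : i ≤ k ∧ k - i < array.length <;> simp [h]
  simp only [hpt]

theorem diagonalize_eq (array : List (List String)) :
    diagonalize array = (List.range (2*array.length-1)).map
      (fun k => PySem.Str.join "" (pvDiagCells array k)) := by
  unfold diagonalize
  have hrowid : ∀ row : List String, row.foldl (fun r element => r ++ [element]) [] = row := by
    intro row
    simpa using PySem.List.foldl_append_singleton_eq_map (fun element => element) row []
  simp only [hrowid]
  have hnew : array.foldl (fun acc row => acc ++ [row]) [] = array := by
    simpa using PySem.List.foldl_append_singleton_eq_map (fun row => row) array []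
  rw [hnew]
  rw [PySem.List.foldl_append_singleton_eq_map (f := fun row => PySem.Str.join "" row)]
  apply List.ext_getElem?
  intro k
  have hnest : (List.range array.length).foldl (fun aux i =>
      (List.range array.length).foldl (fun aux j =>
        aux.modify (i+j) (fun r => r ++ [(array.getD i []).getD j ""])) aux)
      ((List.range (2*array.length-1)).map (fun _ => ([] : List String)))
      = ((List.range array.length).flatMap
          (fun i => (List.range array.length).map (fun j => (i+j, pvCell array i j)))).foldl
        (fun a p => a.modify p.1 (fun r => r ++ [p.2]))
        ((List.range (2*array.length-1)).map (fun _ => ([] : List String))) := by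
    rw [foldl_flatMap']
    apply PySem.List.foldl_congr_mem
    intro acc i _
    rw [List.foldl_map]
    rfl
  rw [hnest]
  simp only [List.nil_append, List.getElem?_map, foldl_modify_get?]
  by_cases hk : k < 2*array.length-1
  · simp only [List.getElem?_range hk, Option.map_some, Option.some.injEq]
    rw [pairs_filter array k]
    simp
  · have h1 : (List.range (2*array.length-1))[k]? = none := by
      simp [List.getElem?_range]; omega
    simp [h1]

theorem foldl_append_if_len (row : List (List Char)) : ∀ idx : List Nat,
    row.foldl (fun idx e => if 4 ≤ e.length then idx ++ [e.length] else idx) idx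
      = idx ++ ((row.filter (fun e => decide (4 ≤ e.length))).map List.length) := by
  induction row with
  | nil => simp
  | cons e t ih =>
    intro idx
    by_cases h : 4 ≤ e.length <;> simp [List.filter_cons, h, ih]

theorem A_eq_any (array : List (List String)) :
    get_diagonal_one_sided array
      = (List.range (2*array.length-1)).any (fun k => pvDetA (pvDiagChars array k)) := by
  have hrow : ∀ k : Nat,
      PySem.Chars.splitOn (PySem.Chars.join []
        (List.map (fun element => PySem.Int.toChars element)
          (List.map (fun element => if element = 'A' then (1:Int) else 0)
            (PySem.Str.join "" (pvDiagCells array k)).toList))) ['0']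
      = PySem.Chars.splitOn (pvMask01 (pvDiagChars array k)) ['0'] := by
    intro k
    rw [mask_chars]
    congr 1
    rw [PySem.Str.toList_join, show ("".toList : List Char) = [] from rfl, join_nil_flatten]
    rfl
  have hidx : ∀ (res : List (List (List Char))) (idx : List Nat),
      res.foldl (fun idx row => row.foldl (fun idx element =>
        if 4 ≤ element.length then idx ++ [element.length] else idx) idx) idx
      = idx ++ res.flatMap (fun row => (row.filter (fun e => decide (4 ≤ e.length))).map List.length) := by
    intro res idx
    rw [PySem.List.foldl_congr_mem _ _ (fun idx row => idx ++
      ((row.filter (fun e => decide (4 ≤ e.length))).map List.length)) _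
      (by intro acc x _; exact foldl_append_if_len x acc)]
    rw [PySem.List.foldl_append_eq_flatMap]
  unfold get_diagonal_one_sided
  rw [diagonalize_eq]
  simp only [List.foldl_cons, List.foldl_nil]
  simp only [PySem.List.foldl_append_singleton_eq_map, List.nil_append, List.map_map]
  simp only [hidx, List.nil_append, List.flatMap_map]
  split
  · rename_i h
    symm
    simp only [ne_eq, List.flatMap_eq_nil_iff] at h
    push_neg at h
    obtain ⟨k, hk, hne2⟩ := h
    simp only [Function.comp_apply, hrow] at hne2
    simp only [List.any_eq_true]
    refine ⟨k, hk, ?_⟩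
    unfold pvDetA
    rw [List.any_eq_true]
    simp only [ne_eq, List.map_eq_nil_iff, List.filter_eq_nil_iff] at hne2
    push_neg at hne2
    obtain ⟨e, he, h4⟩ := hne2
    exact ⟨e, he, by simpa using h4⟩
  · rename_i h
    rw [not_not] at h
    rw [List.flatMap_eq_nil_iff] at h
    symm
    rw [List.any_eq_false]
    intro k hk
    have hk2 := h k hk
    simp only [Function.comp_apply, hrow] at hk2
    simp only [List.map_eq_nil_iff, List.filter_eq_nil_iff] at hk2
    rw [Bool.not_eq_true]
    unfold pvDetA
    rw [List.any_eq_false]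
    intro e he
    exact hk2 e he

theorem diagCells_eq_range' (array : List (List String)) (k : Nat) :
    pvDiagCells array k
      = (List.range' (k+1-array.length) (min array.length (k+1) - (k+1-array.length))).map
          (fun i => pvCell array i (k-i)) := by
  unfold pvDiagCells
  rw [flatMap_if_singleton]
  rw [List.filter_congr (q := fun i =>
    decide ((k+1-array.length) ≤ i ∧ i < min array.length (k+1)))
    (by intro i hi; simp only [decide_eq_decide]; rw [List.mem_range] at hi; omega)]
  rw [filter_range_Ico]
  congr 2
  omega

theorem alt_inner (array : List (List String)) (k : Nat) (st0 : Bool × Nat) :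
    (List.range' (k+1-array.length) (min array.length (k+1) - (k+1-array.length))).foldl
      (fun (st : Bool × Nat) i => ((array.getD i []).getD (k-i) "").toList.foldl
        (fun (st : Bool × Nat) ch =>
          if ch = 'A' then (if st.2 + 1 = 4 then true else st.1, st.2 + 1)
          else (st.1, 0)) st) st0
    = (pvDiagChars array k).foldl pvStep st0 := by
  unfold pvDiagChars
  rw [diagCells_eq_range', List.map_map, List.foldl_flatten, List.foldl_map]
  rfl

theorem step_found (cs : List Char) : ∀ (f : Bool) (r : Nat),
    cs.foldl pvStep (f, r) = (f || (cs.foldl pvStep (false, r)).1, (cs.foldl pvStep (false, r)).2) := by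
  induction cs with
  | nil => intro f r; simp
  | cons c t ih =>
    intro f r
    simp only [List.foldl_cons]
    by_cases hc : c = 'A'
    · subst hc
      by_cases he : r + 1 = 4
      · simp only [pvStep, ite_true, if_pos he, if_pos rfl]
        rw [ih true (r+1)]
        simp
      · simp only [pvStep, ite_true, if_neg he, if_pos rfl]
        rw [ih f (r+1), ih false (r+1)]
    · simp only [pvStep, if_neg hc]
      rw [ih f 0, ih false 0]

theorem foldl_or_any (g : Nat → Bool) (ks : List Nat) : ∀ f : Bool,
    ks.foldl (fun fo k => fo || g k) f = (f || ks.any g) := by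
  induction ks with
  | nil => intro f; simp
  | cons k t ih =>
    intro f
    simp only [List.foldl_cons, List.any_cons]
    rw [ih]
    cases f <;> cases g k <;> simp

theorem B_eq_any (array : List (List String)) :
    get_diagonal_one_sided_alt array
      = (List.range (2*array.length-1)).any
          (fun k => ((pvDiagChars array k).foldl pvStep (false, 0)).1) := by
  unfold get_diagonal_one_sided_alt
  rw [PySem.List.foldl_congr_mem _ _
    (fun found k => found || ((pvDiagChars array k).foldl pvStep (false, 0)).1) _
    (by
      intro acc k _
      rw [alt_inner array k (acc, 0), step_found])]
  rw [foldl_or_any]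
  simp

-- final
theorem final (array : List (List String)) :
    get_diagonal_one_sided array = get_diagonal_one_sided_alt array := by
  rw [A_eq_any, B_eq_any]
  simp only [detA_eq_run]

-- ===== VERDICT (by name: the statement is the Claim_ definition above) =====
theorem get_diagonal_one_sided_spec : Claim_equal_get_diagonal_one_sided := by
  intro array _ _
  unfold Spec_get_diagonal_one_sided
  exact final array
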